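-- pv_equiv track=rewrite | github.com/hallucious/Nexa | src/engine/execution_debugger.py | _detect_failed_nodes
-- ===== SOURCE A (Python) =====
-- from typing import Any
--
-- def _detect_failed_nodes(
--     nodes: dict[str, Any], timeline: list[dict[str, Any]]
-- ) -> list[str]:
--     failed = []
--
--     for node_id, node in nodes.items():
--         if node.get("status") == "failed":
--             failed.append(node_id)
--
--     for e in timeline:
--         if e.get("event") == "node_failed":
--             node_id = e.get("node_id")
--             if node_id not in failed:
--                 failed.append(node_id)
--
--     return failed
-- ===== SOURCE B (Python) =====
-- def _detect_failed_nodes(nodes, timeline):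
--     def first_seen(xs):
--         # recursive dedup: keep the head and strip it from the deduped tail
--         if not xs:
--             return []
--         head, tail = xs[0], xs[1:]
--         return [head] + [y for y in first_seen(tail) if y != head]
--
--     stream = [nid for nid, n in nodes.items() if n.get("status") == "failed"]
--     stream += [e.get("node_id") for e in timeline if e.get("event") == "node_failed"]
--     return first_seen(stream)
-- ===== Notes on version B (the rewrite author's own statement) =====
-- stated objective: alternative
-- what changed: Replaces A's stateful loops (append + membership check against the growing accumulator) by building the raw id stream first and deduplicating it with a stateless recursive function that keeps the head and filters it out of the deduped tail.
-- outside the precondition, e.g. on _detect_failed_nodes({}, [{'event': 'node_failed'}]): A returns [None], B returns [None]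
import Mathlib
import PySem

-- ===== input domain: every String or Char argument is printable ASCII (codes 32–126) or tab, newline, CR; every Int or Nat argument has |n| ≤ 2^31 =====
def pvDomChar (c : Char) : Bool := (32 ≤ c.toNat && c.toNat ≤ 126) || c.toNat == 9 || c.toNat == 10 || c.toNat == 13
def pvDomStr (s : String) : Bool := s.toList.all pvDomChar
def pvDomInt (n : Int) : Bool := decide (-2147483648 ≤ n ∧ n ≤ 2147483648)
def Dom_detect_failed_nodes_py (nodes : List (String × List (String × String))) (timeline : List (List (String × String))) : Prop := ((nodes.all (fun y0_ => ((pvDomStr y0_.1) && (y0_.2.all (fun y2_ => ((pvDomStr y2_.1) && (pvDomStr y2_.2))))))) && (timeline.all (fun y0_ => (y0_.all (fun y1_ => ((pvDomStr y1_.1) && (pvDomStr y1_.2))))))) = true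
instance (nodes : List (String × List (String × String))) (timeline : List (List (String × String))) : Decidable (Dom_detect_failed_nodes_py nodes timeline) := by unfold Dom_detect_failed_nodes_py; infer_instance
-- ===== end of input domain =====

-- B replaces A's stateful accumulator loops by building the raw id stream and deduplicating it
-- with a stateless recursive head-removal function; alternative decomposition, not faster.

-- ===== PORT A =====
def detect_failed_nodes_py (nodes : List (String × List (String × String))) (timeline : List (List (String × String))) : List String :=
  let failed : List String :=
    nodes.foldl (fun acc p =>
      if (PySem.Dict.mk p.2).get? "status" = some "failed" then acc ++ [p.1] else acc) []
  timeline.foldl (fun acc e =>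
    if (PySem.Dict.mk e).get? "event" = some "node_failed" then
      -- e.get("node_id") may be None in Python (unrepresentable in List String); Pre_ guarantees the key is present
      let nid := ((PySem.Dict.mk e).get? "node_id").getD ""
      if nid ∈ acc then acc else acc ++ [nid]
    else acc) failed

-- ===== PORT B =====
-- B's recursive dedup: keep the head, strip it from the deduped tail.
def pvFirstSeen : List String → List String
  | [] => []
  | h :: t => h :: (pvFirstSeen t).filter (fun y => y ≠ h)

def detect_failed_nodes_py_alt (nodes : List (String × List (String × String))) (timeline : List (List (String × String))) : List String :=
  let stream : List String :=
    (nodes.filter (fun p => (PySem.Dict.mk p.2).get? "status" == some "failed")).map Prod.fst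
      ++ (timeline.filter (fun e => (PySem.Dict.mk e).get? "event" == some "node_failed")).map
          (fun e => ((PySem.Dict.mk e).get? "node_id").getD "")   -- None excluded by Pre_
  pvFirstSeen stream

-- ===== PRECONDITION & SPEC =====
-- Pre_ excludes (a) nodes association lists with duplicate keys, which cannot arise from a Python dict,
-- and (b) timelines where a "node_failed" event lacks the "node_id" key, on which A returns a list
-- containing None — not a value of the declared type list[str] (B returns the same list there in Python).
def Pre_detect_failed_nodes_py (nodes : List (String × List (String × String))) (timeline : List (List (String × String))) : Prop :=
  (nodes.map Prod.fst).Nodup ∧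
  ∀ e ∈ timeline, (PySem.Dict.mk e).get? "event" = some "node_failed" →
    ((PySem.Dict.mk e).get? "node_id").isSome
instance (nodes : List (String × List (String × String))) (timeline : List (List (String × String))) : Decidable (Pre_detect_failed_nodes_py nodes timeline) := by unfold Pre_detect_failed_nodes_py; infer_instance

def pvWitness_detect_failed_nodes_py : (List (String × List (String × String))) × (List (List (String × String))) :=
  ([("a", [("status", "failed")]), ("b", [("status", "ok")])],
   [[("event", "node_failed"), ("node_id", "c")], [("event", "node_failed"), ("node_id", "a")]])

def Spec_detect_failed_nodes_py (nodes : List (String × List (String × String))) (timeline : List (List (String × String))) (out : List String) : Prop := out = detect_failed_nodes_py_alt nodes timeline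
instance (nodes : List (String × List (String × String))) (timeline : List (List (String × String))) (out : List String) : Decidable (Spec_detect_failed_nodes_py nodes timeline out) := by unfold Spec_detect_failed_nodes_py; infer_instance

-- ===== CLAIM (what is proved, stated in full; the proofs are below) =====
def Claim_equal_detect_failed_nodes_py : Prop := ∀ (nodes : List (String × List (String × String))) (timeline : List (List (String × String))), Dom_detect_failed_nodes_py nodes timeline → Pre_detect_failed_nodes_py nodes timeline → Spec_detect_failed_nodes_py nodes timeline (detect_failed_nodes_py nodes timeline)

-- ===== LEMMAS AND PROOFS =====

-- A's first loop is a filter+map.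
theorem pv_nodes_loop :
    ∀ (nodes : List (String × List (String × String))) (acc : List String),
      nodes.foldl (fun acc p =>
        if (PySem.Dict.mk p.2).get? "status" = some "failed" then acc ++ [p.1] else acc) acc
      = acc ++ (nodes.filter (fun p => (PySem.Dict.mk p.2).get? "status" == some "failed")).map Prod.fst := by
  intro nodes
  induction nodes with
  | nil => intro acc; simp
  | cons x xs ih =>
    intro acc
    by_cases hx : (PySem.Dict.mk x.2).get? "status" = some "failed"
    · have hb : ((PySem.Dict.mk x.2).get? "status" == some "failed") = true := by simp [hx]
      simp only [List.foldl, List.filter_cons, hb, if_pos hx, List.map_cons, if_true]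
      rw [ih]
      simp
    · have hb : ((PySem.Dict.mk x.2).get? "status" == some "failed") = false := by simp [hx]
      simp only [List.foldl, List.filter_cons, hb, if_neg hx, Bool.false_eq_true, if_false]
      exact ih acc

-- The dedup-insert step of A's second loop is PySem.Set.add.
theorem pv_step_eq_add (acc : List String) (nid : String) :
    (if nid ∈ acc then acc else acc ++ [nid]) = PySem.Set.add acc nid := by
  simp [PySem.Set.add, PySem.Set.contains]

-- A's second loop, under Pre_, is a Set.add fold over the matching timeline ids.
theorem pv_timeline_loop (timeline : List (List (String × String))) :
    ∀ (acc : List String),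
      timeline.foldl (fun acc e =>
        if (PySem.Dict.mk e).get? "event" = some "node_failed" then
          let nid := ((PySem.Dict.mk e).get? "node_id").getD ""
          if nid ∈ acc then acc else acc ++ [nid]
        else acc) acc
      = ((timeline.filter (fun e => (PySem.Dict.mk e).get? "event" == some "node_failed")).map
          (fun e => ((PySem.Dict.mk e).get? "node_id").getD "")).foldl PySem.Set.add acc := by
  induction timeline with
  | nil => intro acc; simp
  | cons e tl ih =>
    intro acc
    by_cases he : (PySem.Dict.mk e).get? "event" = some "node_failed"
    · have hb : ((PySem.Dict.mk e).get? "event" == some "node_failed") = true := by simp [he]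
      simp only [List.foldl, List.filter_cons, hb, if_pos he, List.map_cons, if_true]
      rw [ih, pv_step_eq_add]
    · have hb : ((PySem.Dict.mk e).get? "event" == some "node_failed") = false := by simp [he]
      simp only [List.foldl, List.filter_cons, hb, if_neg he, Bool.false_eq_true, if_false]
      exact ih acc

-- A Set.add fold is the accumulator followed by the first-seen dedup of the new elements.
theorem pv_foldl_add :
    ∀ (xs acc : List String),
      xs.foldl PySem.Set.add acc = acc ++ (pvFirstSeen xs).filter (fun x => decide (x ∉ acc)) := by
  intro xs
  induction xs with
  | nil => intro acc; simp [pvFirstSeen]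
  | cons h t ih =>
    intro acc
    simp only [List.foldl, pvFirstSeen, List.filter_cons]
    by_cases hm : h ∈ acc
    · rw [PySem.Set.add_of_mem hm, ih]
      have : (decide (h ∉ acc)) = false := by simp [hm]
      rw [this]
      simp only [Bool.false_eq_true, if_false]
      congr 1
      rw [List.filter_filter]
      apply List.filter_congr
      intro x hx
      by_cases hxa : x ∈ acc
      · simp [hxa]
      · have hxh : x ≠ h := fun hxh => hxa (hxh ▸ hm)
        simp [hxa, hxh]
    · rw [PySem.Set.add_of_not_mem hm, ih]
      have : (decide (h ∉ acc)) = true := by simp [hm]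
      rw [this]
      simp only [if_true, List.append_assoc, List.singleton_append]
      congr 2
      rw [List.filter_filter]
      apply List.filter_congr
      intro x hx
      by_cases hxh : x = h
      · simp [hxh, hm]
      · simp [hxh, List.mem_append]

-- pvFirstSeen over a nodup prefix keeps the prefix and dedups the rest against it.
theorem pv_firstSeen_append :
    ∀ (a b : List String), a.Nodup →
      pvFirstSeen (a ++ b) = a ++ (pvFirstSeen b).filter (fun x => decide (x ∉ a)) := by
  intro a
  induction a with
  | nil => intro b _; simp
  | cons h t ih =>
    intro b hnd
    have hnd' := hnd.of_cons
    have hht : h ∉ t := (List.nodup_cons.mp hnd).1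
    simp only [List.cons_append, pvFirstSeen, ih b hnd', List.filter_append]
    congr 1
    have h1 : t.filter (fun y => decide (y ≠ h)) = t := by
      apply List.filter_eq_self.mpr
      intro x hx
      have : x ≠ h := fun hxh => hht (hxh ▸ hx)
      simpa using this
    rw [h1]
    congr 1
    rw [List.filter_filter]
    apply List.filter_congr
    intro x hx
    by_cases hxn : x ∈ t
    · simp [hxn]
    · by_cases hxh : x = h <;> simp [hxh, hxn]

-- The deduped node-id list inherits Nodup from the dict's unique keys.
theorem pv_from_nodes_nodup (nodes : List (String × List (String × String)))
    (h : (nodes.map Prod.fst).Nodup) (c : String × List (String × String) → Bool) :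
    ((nodes.filter c).map Prod.fst).Nodup :=
  h.sublist (List.Sublist.map Prod.fst List.filter_sublist)

theorem detect_failed_nodes_py_spec : Claim_equal_detect_failed_nodes_py := by
  intro nodes timeline _hdom hpre
  obtain ⟨hnodup, _htl⟩ := hpre
  unfold Spec_detect_failed_nodes_py
  simp only [detect_failed_nodes_py, detect_failed_nodes_py_alt]
  rw [pv_nodes_loop, List.nil_append, pv_timeline_loop, pv_foldl_add,
    pv_firstSeen_append _ _ (pv_from_nodes_nodup nodes hnodup _)]
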